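-- pv_equiv track=rewrite | github.com/maxsupermanhd/mapgen | gen.py | LayoutStripper
-- ===== SOURCE A (Python) =====
-- def LayoutStripper(l):
-- 	s = 0
-- 	for r in range(len(l)):
-- 		for c in range(len(l[r])):
-- 			s += l[r][c]
-- 	if s == 0:
-- 		raise Exception('Empty-tileset', 'Nothing to trim!')
-- 	r = 0
-- 	while r < len(l):
-- 		s = 0
-- 		c = 0
-- 		while c < len(l[r]):
-- 			s += l[r][c]
-- 			c += 1
-- 		if s == 0:
-- 			del l[r]
-- 		else:
-- 			r += 1
-- 	c = 0
-- 	while c < len(l[0]):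
-- 		s = 0
-- 		r = 0
-- 		while r < len(l):
-- 			s += l[r][c]
-- 			r += 1
-- 		if s == 0:
-- 			r = 0
-- 			while r < len(l):
-- 				del l[r][c]
-- 				r += 1
-- 		else:
-- 			c += 1
-- 	return l
-- ===== SOURCE B (Python) =====
-- def LayoutStripper(l):
--     # Returns the trimmed grid built in one pass (A mutates l in place; equivalence is about the return value).
--     kept = [row for row in l if sum(row) != 0]
--     cols = [c for c in range(len(kept[0])) if sum(row[c] for row in kept) != 0]
--     return [[row[c] for c in cols] for row in kept]
-- ===== Notes on version B (the rewrite author's own statement) =====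
-- stated objective: faster
-- what changed: Instead of repeatedly deleting zero-sum rows and columns in place (each column deletion shifts every row), B computes the kept rows and kept column indices once and rebuilds the grid in a single pass.
-- outside the precondition, e.g. on LayoutStripper([[1], [1, 5]]): A returns [[1], [1, 5]], B returns [[1], [1]]
import Mathlib
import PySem

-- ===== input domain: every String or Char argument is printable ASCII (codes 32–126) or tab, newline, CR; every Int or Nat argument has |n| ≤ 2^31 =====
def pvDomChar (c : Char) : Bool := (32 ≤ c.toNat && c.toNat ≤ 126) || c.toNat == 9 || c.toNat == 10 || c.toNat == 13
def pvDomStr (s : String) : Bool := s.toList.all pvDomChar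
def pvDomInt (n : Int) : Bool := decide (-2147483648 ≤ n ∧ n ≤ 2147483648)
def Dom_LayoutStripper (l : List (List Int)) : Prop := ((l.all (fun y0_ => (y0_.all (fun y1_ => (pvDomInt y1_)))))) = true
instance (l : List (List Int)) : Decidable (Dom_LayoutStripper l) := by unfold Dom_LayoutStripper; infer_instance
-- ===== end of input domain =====

-- B replaces A's in-place deletion of zero-sum rows/columns (each column deletion shifts every row)
-- by one rebuild from row/column sums; A mutates its argument, the equivalence is about the return value.


-- ===== PORT A =====
-- inner `while c < len(l[r]): s += l[r][c]` loop
def pvRowSumA (row : List Int) : Int := row.foldl (fun s x => s + x) 0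

-- the `while r < len(l)` loop: delete row r if its sum is 0, else advance r
def pvRowLoopA : List (List Int) → List (List Int)
  | [] => []
  | row :: rest => if pvRowSumA row = 0 then pvRowLoopA rest else row :: pvRowLoopA rest

-- inner `while r < len(l): s += l[r][c]` loop (in-range inside Pre_, where the grid is rectangular)
def pvColSumA (g : List (List Int)) (c : Nat) : Int := g.foldl (fun s row => s + row.getD c 0) 0

-- the `while c < len(l[0])` loop: delete column c from every row if its sum is 0, else advance c
def pvColLoopA (g : List (List Int)) (c : Nat) : List (List Int) :=
  if h : c < (g.headD []).length then
    if pvColSumA g c = 0 then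
      pvColLoopA (g.map (fun row => row.eraseIdx c)) c
    else
      pvColLoopA g (c + 1)
  else g
termination_by (g.headD []).length - c
decreasing_by
  · cases g with
    | nil => simp at h
    | cons r t => simp_all [List.length_eraseIdx]; omega
  · omega

def LayoutStripper (l : List (List Int)) : List (List Int) :=
  let s := l.foldl (fun s row => row.foldl (fun a x => a + x) s) 0
  if s = 0 then []  -- Python raises Exception('Empty-tileset', …) here; excluded by Pre_
  else pvColLoopA (pvRowLoopA l) 0

-- ===== PORT B =====
def LayoutStripper_alt (l : List (List Int)) : List (List Int) :=
  let kept := l.filter (fun row => decide (row.sum ≠ 0))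
  let cols := (List.range (kept.headD []).length).filter
      (fun c => decide ((kept.map (fun row => row.getD c 0)).sum ≠ 0))
  kept.map (fun row => cols.map (fun c => row.getD c 0))

-- ===== PRECONDITION & SPEC =====
-- Pre_ excludes (a) grids whose total sum is 0, where A raises Exception('Empty-tileset'),
-- and (b) ragged grids, where A either raises IndexError or scans only len(l[0]) columns,
-- an accident of its implementation.
def Pre_LayoutStripper (l : List (List Int)) : Prop :=
  (∀ row ∈ l, row.length = (l.headD []).length) ∧ (l.map List.sum).sum ≠ 0

instance (l : List (List Int)) : Decidable (Pre_LayoutStripper l) := by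
  unfold Pre_LayoutStripper; infer_instance

def pvWitness_LayoutStripper : List (List Int) := [[1, 0], [0, 0]]

def Spec_LayoutStripper (l : List (List Int)) (out : List (List Int)) : Prop := out = LayoutStripper_alt l
instance (l : List (List Int)) (out : List (List Int)) : Decidable (Spec_LayoutStripper l out) := by unfold Spec_LayoutStripper; infer_instance

-- ===== CLAIM (what is proved, stated in full; the proofs are below) =====
def Claim_equal_LayoutStripper : Prop := ∀ (l : List (List Int)), Dom_LayoutStripper l → Pre_LayoutStripper l → Spec_LayoutStripper l (LayoutStripper l)

-- ===== LEMMAS AND PROOFS =====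

lemma pvFoldlAdd (l : List Int) (a : Int) : l.foldl (fun s x => s + x) a = a + l.sum := by
  induction l generalizing a with
  | nil => simp
  | cons x t ih => simp [List.foldl_cons, ih, add_assoc]

lemma pvRowSumA_eq (row : List Int) : pvRowSumA row = row.sum := by
  simp [pvRowSumA, pvFoldlAdd]

lemma pvTotalFoldl (l : List (List Int)) (a : Int) :
    l.foldl (fun s row => row.foldl (fun a x => a + x) s) a = a + (l.map List.sum).sum := by
  induction l generalizing a with
  | nil => simp
  | cons r t ih => rw [List.foldl_cons, pvFoldlAdd, ih]; simp [add_assoc]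

lemma pvColSumFoldl (g : List (List Int)) (c : Nat) (a : Int) :
    g.foldl (fun s row => s + row.getD c 0) a = a + (g.map (fun row => row.getD c 0)).sum := by
  induction g generalizing a with
  | nil => simp
  | cons r t ih => rw [List.foldl_cons, ih]; simp [add_assoc]

lemma pvColSumA_eq (g : List (List Int)) (c : Nat) :
    pvColSumA g c = (g.map (fun row => row.getD c 0)).sum := by
  rw [pvColSumA, pvColSumFoldl]; simp

lemma pvRowLoopA_eq_filter (l : List (List Int)) :
    pvRowLoopA l = l.filter (fun row => decide (row.sum ≠ 0)) := by
  induction l with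
  | nil => rfl
  | cons r t ih =>
    by_cases h : r.sum = 0 <;>
      simp [pvRowLoopA, pvRowSumA_eq, h, ih]

lemma pvGetD_eraseIdx (row : List Int) (c j : Nat) (h : c ≤ j) :
    (row.eraseIdx c).getD j 0 = row.getD (j+1) 0 := by
  simp [List.getD_eq_getElem?_getD, List.getElem?_eraseIdx, Nat.not_lt.mpr h]

lemma pvColSumA_shift (g : List (List Int)) (c j : Nat) (h : c ≤ j) :
    pvColSumA (g.map (fun row => row.eraseIdx c)) j = pvColSumA g (j+1) := by
  simp only [pvColSumA_eq, List.map_map]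
  congr 1
  apply List.map_congr_left
  intro row _
  simpa using pvGetD_eraseIdx row c j h

lemma pvRange'_shift (c m : Nat) : List.range' (c+1) m = (List.range' c m).map (·+1) := by
  have := List.map_add_range' (a := 1) c m 1
  simpa [add_comm] using this.symm

-- main characterisation of A's column-deletion loop on a rectangular grid
lemma pvColLoopA_spec (k : Nat) (g : List (List Int)) (n c : Nat)
    (hk : n - c = k) (hlen : ∀ row ∈ g, row.length = n) :
    pvColLoopA g c = g.map (fun row => row.take c ++
      ((List.range' c (n - c)).filter (fun j => decide (pvColSumA g j ≠ 0))).map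
        (fun j => row.getD j 0)) := by
  induction k generalizing g n c with
  | zero =>
    rw [pvColLoopA]
    cases g with
    | nil => simp
    | cons r t =>
      have hr : r.length = n := hlen r (List.mem_cons_self ..)
      have hnc : ¬ c < ((r :: t).headD []).length := by
        simp only [List.headD_cons, hr]; omega
      rw [dif_neg hnc, hk]
      simp only [List.range'_zero, List.filter_nil, List.map_nil, List.append_nil]
      have : List.map (fun row : List Int => row.take c) (r :: t)
           = List.map id (r :: t) := by
        apply List.map_congr_left
        intro row hrow
        exact List.take_of_length_le (by rw [hlen row hrow]; omega)
      rw [this, List.map_id]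
  | succ k ih =>
    have hc : c < n := by omega
    cases g with
    | nil => rw [pvColLoopA]; simp
    | cons r t =>
      have hr : r.length = n := hlen r (List.mem_cons_self ..)
      rw [pvColLoopA]
      have hlt : c < ((r :: t).headD []).length := by
        simp only [List.headD_cons, hr]; exact hc
      rw [dif_pos hlt]
      have hrange : List.range' c (n - c) = c :: List.range' (c+1) (n - (c+1)) := by
        have h1 : n - c = (n - (c+1)) + 1 := by omega
        rw [h1, List.range'_succ]
      by_cases hs : pvColSumA (r :: t) c = 0
      · rw [if_pos hs]
        have hlen' : ∀ row ∈ (r :: t).map (fun row => row.eraseIdx c),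
            row.length = n - 1 := by
          intro row hrow
          obtain ⟨row0, hrow0, rfl⟩ := List.mem_map.mp hrow
          rw [List.length_eraseIdx, hlen row0 hrow0, if_pos hc]
        rw [ih ((r :: t).map fun row => row.eraseIdx c) (n-1) c (by omega) hlen']
        rw [List.map_map]
        apply List.map_congr_left
        intro row hrow
        have hrl : row.length = n := hlen row hrow
        simp only [Function.comp]
        rw [hrange, List.filter_cons, if_neg (by simp [hs])]
        have htake : (row.eraseIdx c).take c = row.take c := by
          rw [List.eraseIdx_eq_take_drop_succ,
              List.take_append_of_le_length (by simp; omega), List.take_take]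
          simp
        rw [htake]
        congr 1
        have hmm : n - 1 - c = n - (c+1) := by omega
        rw [hmm, pvRange'_shift, List.filter_map, List.map_map]
        have hfil : (List.range' c (n-(c+1))).filter
              (fun j => decide (pvColSumA ((r :: t).map fun row => row.eraseIdx c) j ≠ 0))
            = (List.range' c (n-(c+1))).filter
              ((fun j => decide (pvColSumA (r :: t) j ≠ 0)) ∘ (· + 1)) := by
          apply List.filter_congr
          intro j hj
          have hcj : c ≤ j := (List.mem_range'_1.mp hj).1
          have hsh := pvColSumA_shift (r :: t) c j hcj
          simp only [List.map_cons] at hsh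
          simp [hsh]
        rw [hfil]
        apply List.map_congr_left
        intro j hj
        have hcj : c ≤ j := by
          have := List.mem_of_mem_filter hj
          exact (List.mem_range'_1.mp this).1
        simpa using pvGetD_eraseIdx row c j hcj
      · rw [if_neg hs]
        rw [ih (r :: t) n (c+1) (by omega) hlen]
        apply List.map_congr_left
        intro row hrow
        have hrl : row.length = n := hlen row hrow
        rw [hrange, List.filter_cons, if_pos (by simp [hs]), List.map_cons]
        rw [List.take_add_one]
        have hgc : row[c]? = some (row.getD c 0) := by
          rw [List.getD_eq_getElem?_getD, List.getElem?_eq_getElem (by omega)]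
          simp
        rw [hgc]
        simp

theorem pvFinal (l : List (List Int)) (h : Pre_LayoutStripper l) :
    LayoutStripper l = LayoutStripper_alt l := by
  obtain ⟨hrect, hsum⟩ := h
  unfold LayoutStripper LayoutStripper_alt
  rw [pvTotalFoldl l 0, zero_add, if_neg hsum, pvRowLoopA_eq_filter]
  set kept := l.filter (fun row => decide (row.sum ≠ 0)) with hkept
  have hne : kept ≠ [] := by
    intro h0
    apply hsum
    apply List.sum_eq_zero
    intro x hx
    obtain ⟨row, hrow, rfl⟩ := List.mem_map.mp hx
    by_contra hne'
    have hmem : row ∈ kept := List.mem_filter.mpr ⟨hrow, by simp [hne']⟩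
    simp [h0] at hmem
  have hlenk : ∀ row ∈ kept, row.length = (l.headD []).length := fun row hrow =>
    hrect row (List.mem_of_mem_filter hrow)
  have hheadk : (kept.headD []).length = (l.headD []).length := by
    obtain ⟨a, b, hab⟩ := List.exists_cons_of_ne_nil hne
    rw [hab]
    exact hlenk a (by rw [hab]; exact List.mem_cons_self ..)
  rw [pvColLoopA_spec ((l.headD []).length - 0) kept (l.headD []).length 0 rfl hlenk]
  simp only [List.take_zero, List.nil_append, Nat.sub_zero, pvColSumA_eq]
  rw [hheadk, List.range_eq_range']

-- ===== VERDICT (by name: the statement is the Claim_ definition above) =====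
theorem LayoutStripper_spec : Claim_equal_LayoutStripper := by
  intro l _ h
  exact pvFinal l h
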